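-- pv_equiv track=rewrite | github.com/hyunlord/worldsim-training | training/run_qlora_smoke.py | _select_generation_rows
-- ===== SOURCE A (Python) =====
-- DEFAULT_TASKS = ("A", "B", "C", "E", "F", "G", "H")
--
-- def _select_generation_rows(train_rows: list[dict], eval_rows: list[dict]) -> list[dict]:
--     candidates = eval_rows + train_rows
--     picked: list[dict] = []
--     seen: set[str] = set()
--     for task in DEFAULT_TASKS:
--         for row in candidates:
--             if row.get("task") == task and task not in seen:
--                 picked.append(row)
--                 seen.add(task)
--                 break
--     return picked
-- ===== SOURCE B (Python) =====
-- DEFAULT_TASKS = ("A", "B", "C", "E", "F", "G", "H")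
--
-- def _select_generation_rows(train_rows: list[dict], eval_rows: list[dict]) -> list[dict]:
--     first: dict = {}
--     for row in eval_rows + train_rows:
--         task = row.get("task")
--         if task in DEFAULT_TASKS and task not in first:
--             first[task] = row
--     return [first[t] for t in DEFAULT_TASKS if t in first]
-- ===== Notes on version B (the rewrite author's own statement) =====
-- stated objective: simpler
-- what changed: Replaces A's outer loop over tasks with a repeated scan of the candidate list by a single pass that records the first row per task in a dict, then emits rows in DEFAULT_TASKS order.
import Mathlib
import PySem

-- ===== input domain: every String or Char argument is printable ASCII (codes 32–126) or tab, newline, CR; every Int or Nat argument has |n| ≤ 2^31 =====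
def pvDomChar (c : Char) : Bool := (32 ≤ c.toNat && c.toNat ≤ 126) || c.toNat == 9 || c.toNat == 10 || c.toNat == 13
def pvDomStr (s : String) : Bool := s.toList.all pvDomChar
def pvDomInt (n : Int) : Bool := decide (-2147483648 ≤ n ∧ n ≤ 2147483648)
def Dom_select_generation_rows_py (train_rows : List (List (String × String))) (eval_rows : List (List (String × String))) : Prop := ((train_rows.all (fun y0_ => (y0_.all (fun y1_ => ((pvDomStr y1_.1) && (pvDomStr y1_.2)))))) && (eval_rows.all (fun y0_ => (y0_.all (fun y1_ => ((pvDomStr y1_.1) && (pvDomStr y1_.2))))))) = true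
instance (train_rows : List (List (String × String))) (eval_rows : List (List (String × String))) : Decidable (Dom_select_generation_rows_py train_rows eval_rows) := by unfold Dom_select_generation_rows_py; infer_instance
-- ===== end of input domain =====

-- B replaces A's per-task scans over the candidate list with one index-building pass
-- plus an ordered emit (objective: simpler, same behaviour).

def pyDEFAULT_TASKS : List String := ["A", "B", "C", "E", "F", "G", "H"]

-- ===== PORT A =====
-- inner 'for row in candidates: if …: picked.append(row); seen.add(task); break'
def aInner (task : String) (seen : PySem.Set String) : List (List (String × String)) → Option (List (String × String))
  | [] => none
  | r :: rest =>
      if ((PySem.Dict.mk r).get? "task" == some task) && !(PySem.Set.contains seen task) then some r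
      else aInner task seen rest

def select_generation_rows_py (train_rows : List (List (String × String))) (eval_rows : List (List (String × String))) : List (List (String × String)) :=
  let candidates := eval_rows ++ train_rows
  (pyDEFAULT_TASKS.foldl
    (fun (st : List (List (String × String)) × PySem.Set String) task =>
      match aInner task st.2 candidates with
      | some r => (st.1 ++ [r], PySem.Set.add st.2 task)
      | none => st)
    ([], PySem.Set.empty)).1

-- ===== PORT B =====
def select_generation_rows_py_alt (train_rows : List (List (String × String))) (eval_rows : List (List (String × String))) : List (List (String × String)) :=
  let first := (eval_rows ++ train_rows).foldl
    (fun (d : PySem.Dict String (List (String × String))) row =>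
      match (PySem.Dict.mk row).get? "task" with
      | some t => if pyDEFAULT_TASKS.contains t && !(d.contains t) then d.insert t row else d
      | none => d)
    PySem.Dict.empty
  pyDEFAULT_TASKS.filterMap (fun t => first.get? t)

-- ===== PRECONDITION & SPEC =====
def Spec_select_generation_rows_py (train_rows : List (List (String × String))) (eval_rows : List (List (String × String))) (out : List (List (String × String))) : Prop := out = select_generation_rows_py_alt train_rows eval_rows
instance (train_rows : List (List (String × String))) (eval_rows : List (List (String × String))) (out : List (List (String × String))) : Decidable (Spec_select_generation_rows_py train_rows eval_rows out) := by unfold Spec_select_generation_rows_py; infer_instance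

-- ===== CLAIM (what is proved, stated in full; the proofs are below) =====
def Claim_equal_select_generation_rows_py : Prop := ∀ (train_rows : List (List (String × String))) (eval_rows : List (List (String × String))), Dom_select_generation_rows_py train_rows eval_rows → Spec_select_generation_rows_py train_rows eval_rows (select_generation_rows_py train_rows eval_rows)

-- ===== LEMMAS AND PROOFS =====

-- the first candidate row whose "task" value is t
def findRow (t : String) (cs : List (List (String × String))) : Option (List (String × String)) :=
  cs.find? (fun r => (PySem.Dict.mk r).get? "task" == some t)

theorem aInner_eq_findRow (t : String) (seen : PySem.Set String) (cs : List (List (String × String)))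
    (h : PySem.Set.contains seen t = false) : aInner t seen cs = findRow t cs := by
  induction cs with
  | nil => rfl
  | cons r rest ih =>
      simp only [aInner, findRow, List.find?_cons, h]
      by_cases hr : (PySem.Dict.mk r).get? "task" == some t
      · simp [hr]
      · simp only [Bool.not_eq_true] at hr
        simp [hr, ih, findRow]

theorem build_get? (cs : List (List (String × String)))
    (d : PySem.Dict String (List (String × String))) (t : String) (ht : t ∈ pyDEFAULT_TASKS) :
    ((cs.foldl (fun (d : PySem.Dict String (List (String × String))) row =>
        match (PySem.Dict.mk row).get? "task" with
        | some u => if pyDEFAULT_TASKS.contains u && !(d.contains u) then d.insert u row else d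
        | none => d) d).get? t) = (d.get? t).or (findRow t cs) := by
  induction cs generalizing d with
  | nil => simp [findRow]
  | cons r rest ih =>
      simp only [List.foldl_cons]
      have hfind : findRow t (r :: rest)
          = if (PySem.Dict.mk r).get? "task" == some t then some r else findRow t rest := by
        simp only [findRow, List.find?_cons]
        cases h : ((PySem.Dict.mk r).get? "task" == some t) <;> simp_all
      cases hu : (PySem.Dict.mk r).get? "task" with
      | none =>
          rw [ih d, hfind]
          simp [hu]
      | some u =>
          by_cases hins : pyDEFAULT_TASKS.contains u && !(d.contains u)
          · simp only [hins, if_pos]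
            rw [ih _, hfind]
            by_cases htu : t = u
            · subst htu
              have hd : d.get? t = none := by
                have : d.contains t = false := by
                  rcases Bool.and_eq_true .. |>.mp hins with ⟨_, h2⟩
                  simpa using h2
                rw [PySem.Dict.contains_eq_isSome_get?] at this
                cases hg : d.get? t <;> simp [hg] at this ⊢
              simp [hd, hu, PySem.Dict.get?_insert_self]
            · rw [PySem.Dict.get?_insert_of_ne _ _ htu]
              simp only [hu]
              have hne : ((some u == some t : Bool)) = false := by
                simp; exact fun h => htu h.symm
              rw [hne]
              simp
          · have hins' : (pyDEFAULT_TASKS.contains u && !(d.contains u)) = false := by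
              simpa using hins
            simp only [hins', Bool.false_eq_true, if_false]
            rw [ih d, hfind]
            by_cases htu : t = u
            · subst htu
              -- skipped because t is already a key of d (t ∈ pyDEFAULT_TASKS)
              have hcont : d.contains t = true := by
                have htl : pyDEFAULT_TASKS.contains t = true := by
                  simpa using ht
                cases hc : d.contains t
                · rw [htl, hc] at hins'; simp at hins'
                · rfl
              rw [PySem.Dict.contains_eq_isSome_get?] at hcont
              cases hg : d.get? t with
              | none => rw [hg] at hcont; simp at hcont
              | some v => simp [hu]
            · have : ((PySem.Dict.mk r).get? "task" == some t) = false := by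
                simp [hu]; exact fun h => (htu h.symm).elim
              simp [this]

theorem outer_fold (cs : List (List (String × String))) :
    ∀ (ts : List String) (seen : PySem.Set String) (p : List (List (String × String))),
    ts.Nodup → (∀ t ∈ ts, PySem.Set.contains seen t = false) →
    (ts.foldl (fun (st : List (List (String × String)) × PySem.Set String) task =>
        match aInner task st.2 cs with
        | some r => (st.1 ++ [r], PySem.Set.add st.2 task)
        | none => st) (p, seen)).1
      = p ++ ts.filterMap (fun t => findRow t cs) := by
  intro ts
  induction ts with
  | nil => intro seen p _ _; simp
  | cons t rest ih =>
      intro seen p hnd hseen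
      have ht : PySem.Set.contains seen t = false := hseen t (by simp)
      have hrest : ∀ u ∈ rest, PySem.Set.contains seen u = false :=
        fun u hu => hseen u (List.mem_cons_of_mem _ hu)
      have hne : ∀ u ∈ rest, u ≠ t := by
        intro u hu h; subst h; exact (List.nodup_cons.mp hnd).1 hu
      simp only [List.foldl_cons, List.filterMap_cons, aInner_eq_findRow t seen cs ht]
      cases hf : findRow t cs with
      | none =>
          simpa using ih seen p (List.nodup_cons.mp hnd).2 hrest
      | some r =>
          have hadd : ∀ u ∈ rest, PySem.Set.contains (PySem.Set.add seen t) u = false := by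
            intro u hu
            simp only [PySem.Set.add]
            split_ifs with hc
            · exact hrest u hu
            · have h1 : u ∉ seen := by simpa using hrest u hu
              simp [PySem.Set.contains, h1, hne u hu]
          rw [ih (PySem.Set.add seen t) (p ++ [r]) (List.nodup_cons.mp hnd).2 hadd]
          simp

-- ===== VERDICT (by name: the statement is the Claim_ definition above) =====
theorem select_generation_rows_py_spec : Claim_equal_select_generation_rows_py := by
  intro train_rows eval_rows _
  unfold Spec_select_generation_rows_py select_generation_rows_py select_generation_rows_py_alt
  rw [outer_fold (eval_rows ++ train_rows) pyDEFAULT_TASKS PySem.Set.empty [] (by decide)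
    (by intro t _; rfl)]
  simp only [List.nil_append]
  apply List.filterMap_congr
  intro t ht
  rw [build_get? (eval_rows ++ train_rows) PySem.Dict.empty t ht]
  simp
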